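-- pv_equiv track=rewrite | github.com/ObserverPoa/Baekjoon-Algorithms | Baekjoon Online Judge/1062/1062.py | solution
-- ===== SOURCE A (Python) =====
-- import collections
-- import itertools
--
-- def solution(words, k):
--     char_counter = collections.defaultdict(int)
--     words_chars = []
--
--     for word in words:
--         chars = set()
--         for char in word:
--             chars.add(char)
--         for char in chars:
--             char_counter[char] += 1
--         words_chars.append(chars)
--
--     common_chars = [
--         char
--         for [ char, count ] in char_counter.items()
--         if count == len(words)
--     ]
--
--     k -= len(common_chars)
--
--     if k < 0:
--         return 0
--
--     for common_char in common_chars: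
--         del char_counter[common_char]
--
--     general_chars = list(char_counter.keys())
--
--     if k >= len(general_chars):
--         return len(words_chars)
--
--     answer = 0
--
--     for selected_chars in itertools.combinations(general_chars, k):
--         learned_chars = set([*common_chars, *selected_chars])
--
--         answer = max(
--             answer,
--             len(list(filter(lambda word_chars: learned_chars >= word_chars, words_chars)))
--         )
--
--     return answer
-- ===== SOURCE B (Python) =====
-- def go(gen, k, ws):
--     # choose-or-skip DFS over the remaining teachable letters; on "skip c" the
--     # words containing c are dropped immediately (they can never be covered)
--     if k == len(gen):
--         return len(ws)
--     c = gen[0]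
--     skip = go(gen[1:], k, [s for s in ws if c not in s])
--     if k == 0:
--         return skip
--     return max(go(gen[1:], k - 1, ws), skip)
--
-- def solution(words, k):
--     wsets = [set(w) for w in words]
--     seen = []
--     for w in words:
--         for c in w:
--             if c not in seen:
--                 seen.append(c)
--     common, general = [], []
--     for c in seen:
--         if all(c in s for s in wsets):
--             common.append(c)
--         else:
--             general.append(c)
--     k -= len(common)
--     if k < 0:
--         return 0
--     if k >= len(general):
--         return len(words)
--     return go(general, k, wsets)
-- ===== Notes on version B (the rewrite author's own statement) =====
-- stated objective: alternative
-- what changed: B replaces A's enumeration of all k-combinations (itertools.combinations) with a per-combination set-superset filter by a choose-or-skip recursive DFS over the non-common letters that drops a word from the working list the moment one of its letters is skipped, so covered words are counted incrementally on an ever-shrinking list instead of re-filtering all words per combination.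
import Mathlib
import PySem

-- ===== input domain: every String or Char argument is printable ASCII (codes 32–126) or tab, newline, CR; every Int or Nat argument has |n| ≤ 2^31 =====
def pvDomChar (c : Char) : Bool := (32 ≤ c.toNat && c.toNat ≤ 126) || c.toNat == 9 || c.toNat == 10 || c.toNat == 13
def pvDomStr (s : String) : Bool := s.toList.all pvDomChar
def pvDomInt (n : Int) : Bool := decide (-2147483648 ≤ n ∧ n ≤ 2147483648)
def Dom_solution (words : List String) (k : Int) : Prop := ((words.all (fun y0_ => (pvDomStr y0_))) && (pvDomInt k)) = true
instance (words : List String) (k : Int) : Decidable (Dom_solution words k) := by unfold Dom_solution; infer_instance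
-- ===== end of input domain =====

-- B replaces A's enumeration of all k-combinations with a per-combination superset filter by a
-- choose-or-skip DFS over the non-common letters that drops words from the working list as soon as
-- one of their letters is skipped (objective: alternative algorithm, counts on a shrinking list).

-- ===== PORT A =====
-- A-side helper: literal transliteration of itertools.combinations (A calls it)
def pyCombinations {α : Type} : List α → Nat → List (List α)
  | _, 0 => [[]]
  | [], _ + 1 => []
  | x :: xs, n + 1 => (pyCombinations xs n).map (x :: ·) ++ pyCombinations xs (n + 1)

def solution (words : List String) (k : Int) : Int :=
  -- for word in words: chars = set(word); for char in chars: char_counter[char] += 1; words_chars.append(chars)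
  let st := words.foldl
    (fun (st : PySem.Dict Char Int × List (PySem.Set Char)) word =>
      let chars := word.toList.foldl (fun s c => PySem.Set.add s c) PySem.Set.empty
      let cnt := chars.foldl (fun d c => d.modify c 0 (· + 1)) st.1
      (cnt, st.2 ++ [chars]))
    (PySem.Dict.empty, [])
  let charCounter := st.1
  let wordsChars := st.2
  let commonChars := (charCounter.items.filter (fun p => p.2 == (words.length : Int))).map (·.1)
  let k := k - commonChars.length
  if k < 0 then 0
  else
    let charCounter := commonChars.foldl (fun d c => d.erase c) charCounter
    let generalChars := charCounter.keys
    if k ≥ (generalChars.length : Int) then (wordsChars.length : Int)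
    else
      (pyCombinations generalChars k.toNat).foldl
        (fun answer selectedChars =>
          let learned := PySem.Set.ofList (commonChars ++ selectedChars)
          max answer ((wordsChars.filter (fun wc => learned.issuperset wc)).length : Int))
        0

-- ===== PORT B =====
-- choose-or-skip DFS; on 'skip c' the words containing c are dropped from the working list.
-- (the '[] with k ≠ 0' arm is unreachable from solution_alt — Python's go is only called with
-- 0 ≤ k ≤ len(gen); we return 0 there)
def pvGo : List Char → Int → List (PySem.Set Char) → Int
  | [], kk, ws => if kk = 0 then (ws.length : Int) else 0
  | c :: rest, kk, ws =>
    if kk = ((c :: rest).length : Int) then (ws.length : Int)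
    else
      let skip := pvGo rest kk (ws.filter (fun s => !(PySem.Set.contains s c)))
      if kk = 0 then skip
      else max (pvGo rest (kk - 1) ws) skip

def solution_alt (words : List String) (k : Int) : Int :=
  let wsets := words.map (fun w => PySem.Set.ofList w.toList)
  -- for w in words: for c in w: if c not in seen: seen.append(c)
  let seen := words.foldl
    (fun (seen : List Char) w =>
      w.toList.foldl (fun seen c => if seen.contains c then seen else seen ++ [c]) seen)
    []
  -- for c in seen: common.append(c) if all(c in s for s in wsets) else general.append(c)
  let cg := seen.foldl
    (fun (cg : List Char × List Char) c =>
      if wsets.all (fun s => PySem.Set.contains s c) then (cg.1 ++ [c], cg.2)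
      else (cg.1, cg.2 ++ [c]))
    ([], [])
  let common := cg.1
  let general := cg.2
  let k := k - common.length
  if k < 0 then 0
  else if k ≥ (general.length : Int) then (words.length : Int)
  else pvGo general k wsets

-- ===== PRECONDITION & SPEC =====
def Spec_solution (words : List String) (k : Int) (out : Int) : Prop := out = solution_alt words k
instance (words : List String) (k : Int) (out : Int) : Decidable (Spec_solution words k out) := by unfold Spec_solution; infer_instance

-- ===== CLAIM (what is proved, stated in full; the proofs are below) =====
def Claim_equal_solution : Prop := ∀ (words : List String) (k : Int), Dom_solution words k → Spec_solution words k (solution words k)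

-- ===== LEMMAS AND PROOFS =====

-- abbreviations for the proofs
def pvWS (w : String) : PySem.Set Char := PySem.Set.ofList w.toList
def pvPb (words : List String) (c : Char) : Bool := words.all (fun w2 => w2.toList.contains c)
def pvE (words : List String) : PySem.Set Char := PySem.Set.ofList (words.flatMap (·.toList))
-- "every letter of s that lies in gen lies in sel"
def pvP (gen sel : List Char) (s : PySem.Set Char) : Bool :=
  s.all (fun c => !(gen.contains c) || sel.contains c)

-- A's word loop: second component is the list of word char-sets
theorem pvA_fold_snd (words : List String) (d : PySem.Dict Char Int) (acc : List (PySem.Set Char)) :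
    (words.foldl
      (fun (st : PySem.Dict Char Int × List (PySem.Set Char)) word =>
        ((word.toList.foldl (fun s c => PySem.Set.add s c) PySem.Set.empty).foldl
            (fun d c => d.modify c 0 (· + 1)) st.1,
          st.2 ++ [word.toList.foldl (fun s c => PySem.Set.add s c) PySem.Set.empty]))
      (d, acc)).2 = acc ++ words.map pvWS := by
  induction words generalizing d acc with
  | nil => simp
  | cons w ws ih =>
    rw [List.foldl_cons, ih]
    simp [pvWS, PySem.Set.ofList_eq_foldl]

-- A's word loop: first component is the counter of the flattened dedup'd char lists
theorem pvA_fold_fst (words : List String) (d : PySem.Dict Char Int) (acc : List (PySem.Set Char)) :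
    (words.foldl
      (fun (st : PySem.Dict Char Int × List (PySem.Set Char)) word =>
        ((word.toList.foldl (fun s c => PySem.Set.add s c) PySem.Set.empty).foldl
            (fun d c => d.modify c 0 (· + 1)) st.1,
          st.2 ++ [word.toList.foldl (fun s c => PySem.Set.add s c) PySem.Set.empty]))
      (d, acc)).1 =
    ((words.map pvWS).flatten).foldl (fun d c => d.modify c 0 (· + 1)) d := by
  induction words generalizing d acc with
  | nil => simp
  | cons w ws ih =>
    rw [List.foldl_cons, ih]
    simp [List.foldl_append, pvWS, PySem.Set.ofList_eq_foldl, PySem.Set.empty]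

-- count of a char in the flattened dedup'd lists = number of words containing it
theorem pvCount_flat (words : List String) (c : Char) :
    ((words.map pvWS).flatten).count c = words.countP (fun w => w.toList.contains c) := by
  induction words with
  | nil => simp
  | cons w ws ih =>
    simp only [List.map_cons, List.flatten_cons, List.count_append, ih, List.countP_cons]
    have hnd : (pvWS w).Nodup := PySem.Set.nodup_ofList _
    by_cases h : c ∈ w.toList
    · have : c ∈ pvWS w := by simpa [pvWS, PySem.Set.mem_ofList] using h
      rw [List.count_eq_one_of_mem hnd this]
      simp [h]
      omega
    · have : c ∉ pvWS w := by simpa [pvWS, PySem.Set.mem_ofList] using h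
      rw [List.count_eq_zero.2 this]
      simp [h]

theorem pvAdd_update (s seen : PySem.Set Char) (c : Char) :
    PySem.Set.update s (PySem.Set.add seen c) = PySem.Set.add (PySem.Set.update s seen) c := by
  by_cases h : c ∈ seen
  · have h2 : c ∈ PySem.Set.update s seen := (PySem.Set.mem_update s seen c).2 (Or.inr h)
    simp [PySem.Set.add, h, h2]
  · simp only [PySem.Set.add, PySem.Set.contains_iff, h, if_false]
    simp [PySem.Set.update, List.foldl_append, PySem.Set.add]

-- update by a foldl-add: duplicates do not matter
theorem pvUpdate_foldl_add (l : List Char) (s seen : PySem.Set Char) :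
    PySem.Set.update s (l.foldl PySem.Set.add seen) = PySem.Set.update (PySem.Set.update s seen) l := by
  induction l generalizing seen with
  | nil => simp [PySem.Set.update]
  | cons c l ih =>
    rw [List.foldl_cons, ih, pvAdd_update]
    rfl

-- distinct chars of the flattened dedup'd lists = distinct chars of the concatenation
theorem pvUpdate_flat (words : List String) (s : PySem.Set Char) :
    PySem.Set.update s ((words.map pvWS).flatten) = PySem.Set.update s (words.flatMap (·.toList)) := by
  induction words generalizing s with
  | nil => simp
  | cons w ws ih =>
    simp only [List.map_cons, List.flatten_cons, List.flatMap_cons]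
    show PySem.Set.update s (pvWS w ++ (ws.map pvWS).flatten) = _
    rw [show ∀ (t : PySem.Set Char) (a b : List Char), PySem.Set.update t (a ++ b) =
          PySem.Set.update (PySem.Set.update t a) b from fun t a b => List.foldl_append,
        show ∀ (t : PySem.Set Char) (a b : List Char), PySem.Set.update t (a ++ b) =
          PySem.Set.update (PySem.Set.update t a) b from fun t a b => List.foldl_append,
        ih]
    congr 1
    have : pvWS w = w.toList.foldl PySem.Set.add ([] : PySem.Set Char) := by
      simp [pvWS, PySem.Set.ofList_eq_foldl]
    rw [this, pvUpdate_foldl_add]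
    rfl

theorem pvE_eq (words : List String) :
    PySem.Set.ofList ((words.map pvWS).flatten) = pvE words := by
  have h := pvUpdate_flat words []
  simpa [PySem.Set.update_nil_left, pvE] using h

-- items of an erase loop
theorem pvItems_foldl_erase (l : List Char) (d : PySem.Dict Char Int) :
    (l.foldl (fun d c => d.erase c) d).items = d.items.filter (fun p => !(l.contains p.1)) := by
  induction l generalizing d with
  | nil => simp
  | cons c l ih =>
    rw [List.foldl_cons, ih]
    show (d.items.filter (fun p => !(p.1 == c))).filter _ = _
    rw [List.filter_filter]
    apply List.filter_congr
    intro p _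
    by_cases hpc : p.1 = c <;> simp [hpc, Bool.and_comm]

theorem pvPred_count (words : List String) (c : Char) :
    ((((words.map pvWS).flatten).count c : Int) == (words.length : Int)) = pvPb words c := by
  rw [Bool.eq_iff_iff, beq_iff_eq, pvCount_flat]
  simp [pvPb, List.countP_eq_length, List.all_eq_true, Nat.cast_inj]

theorem pvCommon_eq (words : List String) :
    ((PySem.Dict.counter ((words.map pvWS).flatten)).items.filter
        (fun p => p.2 == (words.length : Int))).map (·.1) =
      (pvE words).filter (pvPb words) := by
  rw [PySem.Dict.items_counter, List.filter_map, List.map_map]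
  simp only [Function.comp_def]
  rw [List.map_id', pvE_eq]
  apply List.filter_congr
  intro c _
  exact pvPred_count words c

theorem pvGeneral_eq (words : List String) :
    ((((pvE words).filter (pvPb words)).foldl (fun d c => d.erase c)
        (PySem.Dict.counter ((words.map pvWS).flatten))).keys) =
      (pvE words).filter (fun c => !pvPb words c) := by
  show (((pvE words).filter (pvPb words)).foldl (fun d c => d.erase c)
        (PySem.Dict.counter ((words.map pvWS).flatten))).items.map (·.1) = _
  rw [pvItems_foldl_erase, PySem.Dict.items_counter, List.filter_map, List.map_map]
  simp only [Function.comp_def]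
  rw [List.map_id', pvE_eq]
  apply List.filter_congr
  intro c hc
  have hcon : ((pvE words).filter (pvPb words)).contains c = pvPb words c := by
    by_cases hp : pvPb words c
    · simp [List.mem_filter, hc, hp]
    · have hp2 : pvPb words c = false := Bool.eq_false_iff.mpr hp
      simp [List.mem_filter, hp2]
  rw [hcon]

-- membership in pyCombinations gives a sublist
theorem pvMem_pyCombinations {α : Type} (l : List α) (n : Nat) (sel : List α)
    (h : sel ∈ pyCombinations l n) : sel.Sublist l := by
  induction l generalizing n sel with
  | nil =>
    cases n with
    | zero => simp [pyCombinations] at h; simp [h]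
    | succ m => simp [pyCombinations] at h
  | cons x xs ih =>
    cases n with
    | zero => simp [pyCombinations] at h; simp [h]
    | succ m =>
      simp only [pyCombinations, List.mem_append, List.mem_map] at h
      rcases h with ⟨t, ht, rfl⟩ | h
      · exact (ih m t ht).cons₂ x
      · exact (ih (m + 1) sel h).cons x

-- combinations of full length / too-long length
theorem pvCombinations_len_gt {α : Type} (l : List α) (n : Nat) (h : l.length < n) :
    pyCombinations l n = [] := by
  induction l generalizing n with
  | nil => cases n with
    | zero => omega
    | succ m => rfl
  | cons x xs ih =>
    cases n with
    | zero => omega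
    | succ m =>
      simp only [pyCombinations]
      rw [ih m (by simp only [List.length_cons] at h; omega),
        ih (m + 1) (by simp only [List.length_cons] at h; omega)]
      simp

theorem pvCombinations_full {α : Type} (l : List α) :
    pyCombinations l l.length = [l] := by
  induction l with
  | nil => rfl
  | cons x xs ih =>
    simp only [List.length_cons, pyCombinations, ih]
    rw [pvCombinations_len_gt xs (xs.length + 1) (by omega)]
    simp

-- pulling max out of the fold
theorem pvFoldMax_init {α : Type} (f : α → Int) (l : List α) (a b : Int) :
    l.foldl (fun acc x => max acc (f x)) (max a b) =
      max a (l.foldl (fun acc x => max acc (f x)) b) := by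
  induction l generalizing b with
  | nil => rfl
  | cons x xs ih =>
    simp only [List.foldl_cons]
    rw [max_assoc, ih]

theorem pvFoldMax_le {α : Type} (f : α → Int) (l : List α) :
    ∀ a : Int, a ≤ l.foldl (fun acc x => max acc (f x)) a := by
  induction l with
  | nil => intro a; simp
  | cons x xs ih =>
    intro a
    exact le_trans (le_max_left a (f x)) (ih (max a (f x)))

theorem pvFoldMax_append {α : Type} (f : α → Int) (l1 l2 : List α) :
    (l1 ++ l2).foldl (fun acc x => max acc (f x)) 0 =
      max (l1.foldl (fun acc x => max acc (f x)) 0)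
          (l2.foldl (fun acc x => max acc (f x)) 0) := by
  rw [List.foldl_append]
  have h0 : (0:Int) ≤ l1.foldl (fun acc x => max acc (f x)) 0 := pvFoldMax_le f l1 0
  calc l2.foldl (fun acc x => max acc (f x)) (l1.foldl (fun acc x => max acc (f x)) 0)
      = l2.foldl (fun acc x => max acc (f x)) (max (l1.foldl (fun acc x => max acc (f x)) 0) 0) := by
        rw [max_eq_left h0]
    _ = max (l1.foldl (fun acc x => max acc (f x)) 0) (l2.foldl (fun acc x => max acc (f x)) 0) :=
        pvFoldMax_init f l2 _ 0

-- membership-restricted congruence for List.all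
theorem pvAll_congr {α : Type} {p q : α → Bool} (l : List α) (h : ∀ x ∈ l, p x = q x) :
    l.all p = l.all q := by
  induction l with
  | nil => rfl
  | cons x xs ih =>
    simp only [List.all_cons]
    rw [h x (by simp), ih (fun y hy => h y (by simp [hy]))]

-- pvP simplifications
theorem pvP_nil_gen (sel : List Char) (s : PySem.Set Char) : pvP [] sel s = true := by
  simp [pvP]

theorem pvP_cons_sel (c : Char) (rest sel : List Char) (hc : c ∉ rest) (s : PySem.Set Char) :
    pvP (c :: rest) (c :: sel) s = pvP rest sel s := by
  unfold pvP
  apply pvAll_congr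
  intro x _
  by_cases hx : x = c
  · subst hx
    simp [List.contains_eq_mem, hc]
  · simp [List.contains_eq_mem, hx]

theorem pvP_cons_skip (c : Char) (rest sel : List Char) (hc : c ∉ sel) (s : PySem.Set Char) :
    pvP (c :: rest) sel s = (!(s.contains c) && pvP rest sel s) := by
  by_cases hs : c ∈ s
  · have h1 : pvP (c :: rest) sel s = false := by
      unfold pvP
      rw [Bool.eq_false_iff]
      intro hall
      have := (List.all_eq_true.1 hall) c hs
      simp [List.contains_eq_mem, hc] at this
    have hcc : PySem.Set.contains s c = true := (PySem.Set.contains_iff s c).2 hs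
    rw [h1, hcc]
    simp
  · have hcap : PySem.Set.contains s c = false := by
      rw [Bool.eq_false_iff]
      intro h; exact hs ((PySem.Set.contains_iff s c).1 h)
    rw [hcap]
    simp only [Bool.not_false, Bool.true_and]
    unfold pvP
    apply pvAll_congr
    intro x hx
    have hxc : x ≠ c := fun he => hs (he ▸ hx)
    simp [List.contains_eq_mem, hxc]

-- the central lemma: the DFS computes the max over all k-combinations
theorem pvGo_eq (gen : List Char) (kk : Int) (ws : List (PySem.Set Char))
    (h0 : 0 ≤ kk) (h1 : kk ≤ (gen.length : Int)) (hnd : gen.Nodup) :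
    pvGo gen kk ws =
      (pyCombinations gen kk.toNat).foldl
        (fun acc sel => max acc ((ws.filter (pvP gen sel)).length : Int)) 0 := by
  induction gen generalizing kk ws with
  | nil =>
    have : kk = 0 := le_antisymm (by simpa using h1) h0
    subst this
    simp only [pvGo, Int.toNat_zero, pyCombinations, List.foldl_cons, List.foldl_nil]
    rw [List.filter_eq_self.mpr (fun s _ => pvP_nil_gen [] s)]
    exact (max_eq_right (Int.natCast_nonneg _)).symm
  | cons c rest ih =>
    rw [List.nodup_cons] at hnd
    obtain ⟨hc, hndr⟩ := hnd
    by_cases hfull : kk = ((c :: rest).length : Int)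
    · subst hfull
      rw [pvGo, if_pos rfl]
      have ht : ((((c :: rest).length : Int)).toNat) = (c :: rest).length := by simp
      rw [ht, pvCombinations_full]
      have hall : ws.filter (pvP (c :: rest) (c :: rest)) = ws := by
        apply List.filter_eq_self.mpr
        intro s _
        unfold pvP
        apply List.all_eq_true.2
        intro x _
        simp [List.contains_eq_mem]
        tauto
      rw [List.foldl_cons, List.foldl_nil, hall]
      exact (max_eq_right (Int.natCast_nonneg _)).symm
    · rw [pvGo]
      rw [if_neg hfull]
      have hlt : kk < ((c :: rest).length : Int) := lt_of_le_of_ne h1 hfull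
      have hskip_filter : ∀ sel : List Char, c ∉ sel →
          (ws.filter (fun s => !(PySem.Set.contains s c))).filter (pvP rest sel) =
            ws.filter (pvP (c :: rest) sel) := by
        intro sel hcs
        rw [List.filter_filter]
        apply List.filter_congr
        intro s _
        rw [pvP_cons_skip c rest sel hcs s]
        exact (Bool.and_comm _ _)
      by_cases h00 : kk = 0
      · subst h00
        rw [ih 0 _ le_rfl (by simp) hndr]
        show _ = (pyCombinations (c :: rest) (0 : Int).toNat).foldl _ 0
        simp only [Int.toNat_zero, pyCombinations, List.foldl_cons, List.foldl_nil]
        rw [hskip_filter [] (by simp)]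
        simp
      · rw [if_neg h00]
        have hpos : 0 < kk := lt_of_le_of_ne h0 (Ne.symm h00)
        obtain ⟨m, hm⟩ : ∃ m : Nat, kk.toNat = m + 1 := ⟨kk.toNat - 1, by omega⟩
        have hm1 : (kk - 1).toNat = m := by omega
        have hlen : kk ≤ (rest.length : Int) := by
          simp only [List.length_cons] at hlt
          push_cast at hlt ⊢
          omega
        rw [hm]
        simp only [pyCombinations]
        rw [pvFoldMax_append, List.foldl_map]
        have htake : pvGo rest (kk - 1) ws =
            (pyCombinations rest m).foldl
              (fun acc sel => max acc ((ws.filter (pvP rest sel)).length : Int)) 0 := by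
          have := ih (kk - 1) ws (by omega) (by omega) hndr
          rwa [hm1] at this
        have hskip : pvGo rest kk (ws.filter (fun s => !(PySem.Set.contains s c))) =
            (pyCombinations rest (m + 1)).foldl
              (fun acc sel => max acc (((ws.filter (fun s => !(PySem.Set.contains s c))).filter (pvP rest sel)).length : Int)) 0 := by
          have := ih kk (ws.filter (fun s => !(PySem.Set.contains s c))) h0 hlen hndr
          rwa [hm] at this
        rw [htake, hskip]
        congr 1
        · apply PySem.List.foldl_congr_mem
          intro acc sel _
          have he : ws.filter (pvP rest sel) = ws.filter (pvP (c :: rest) (c :: sel)) :=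
            List.filter_congr (fun s _ => (pvP_cons_sel c rest sel hc s).symm)
          rw [he]
        · apply PySem.List.foldl_congr_mem
          intro acc sel hsel
          have hsub := pvMem_pyCombinations rest (m + 1) sel hsel
          have hcsel : c ∉ sel := fun hin => hc (hsub.mem hin)
          rw [hskip_filter sel hcsel]

-- B's seen loop builds the distinct characters in first-occurrence order
theorem pvSeen_eq (words : List String) :
    words.foldl
      (fun (seen : List Char) w =>
        w.toList.foldl (fun seen c => if seen.contains c then seen else seen ++ [c]) seen)
      [] = pvE words := by
  have hstep : ∀ (seen : List Char) (c : Char),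
      (if seen.contains c then seen else seen ++ [c]) = PySem.Set.add seen c := by
    intro seen c; rfl
  have h1 : ∀ (w : String) (seen : List Char),
      w.toList.foldl (fun seen c => if seen.contains c then seen else seen ++ [c]) seen =
        PySem.Set.update seen w.toList := by
    intro w seen
    simp only [hstep]
    rfl
  simp only [h1]
  have h2 : ∀ (ws : List String) (init : List Char),
      ws.foldl (fun seen w => PySem.Set.update seen w.toList) init =
        PySem.Set.update init (ws.flatMap (·.toList)) := by
    intro ws
    induction ws with
    | nil => intro init; rfl
    | cons w t ih =>
      intro init
      rw [List.foldl_cons, ih, List.flatMap_cons]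
      simp [PySem.Set.update, List.foldl_append]
  rw [h2 words [], PySem.Set.update_nil_left]
  rfl

-- B's partition loop splits seen into the two filters
theorem pvPartition_eq (p : Char → Bool) (l : List Char) (a b : List Char) :
    l.foldl
      (fun (cg : List Char × List Char) c =>
        if p c then (cg.1 ++ [c], cg.2) else (cg.1, cg.2 ++ [c]))
      (a, b) = (a ++ l.filter p, b ++ l.filter (fun c => !p c)) := by
  induction l generalizing a b with
  | nil => simp
  | cons c l ih =>
    rw [List.foldl_cons]
    by_cases hp : p c
    · rw [if_pos hp, ih]
      simp [hp]
    · rw [if_neg hp, ih]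
      simp [hp]

-- B's membership test over word sets agrees with pvPb
theorem pvAllContains_eq (words : List String) (c : Char) :
    (words.map (fun w => PySem.Set.ofList w.toList)).all (fun s => PySem.Set.contains s c) =
      pvPb words c := by
  unfold pvPb
  rw [List.all_map]
  apply pvAll_congr
  intro w _
  rw [Bool.eq_iff_iff]
  constructor
  · intro h
    have := (PySem.Set.contains_iff _ _).1 h
    rw [PySem.Set.mem_ofList] at this
    simpa [List.contains_eq_mem] using this
  · intro h
    apply (PySem.Set.contains_iff _ _).2
    rw [PySem.Set.mem_ofList]
    simpa [List.contains_eq_mem] using h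

-- inside the combination loop: A's superset test = B's pvP test
theorem pvSup_eq_pvP (words : List String) (w : String) (hw : w ∈ words) (sel : List Char)
    (_hsel : sel.Sublist ((pvE words).filter (fun c => !pvPb words c))) :
    (PySem.Set.ofList ((pvE words).filter (pvPb words) ++ sel)).issuperset (pvWS w) =
      pvP ((pvE words).filter (fun c => !pvPb words c)) sel (pvWS w) := by
  set G := (pvE words).filter (fun c => !pvPb words c) with hG
  set C := (pvE words).filter (pvPb words) with hC
  have hmemE : ∀ c, c ∈ w.toList → c ∈ pvE words := by
    intro c hcw
    rw [pvE, PySem.Set.mem_ofList]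
    exact List.mem_flatMap.2 ⟨w, hw, hcw⟩
  rw [Bool.eq_iff_iff, PySem.Set.issuperset_iff]
  unfold pvP
  rw [List.all_eq_true]
  constructor
  · intro h c hcs
    have hx := h c hcs
    rw [PySem.Set.mem_ofList, List.mem_append] at hx
    rcases hx with hx | hx
    · -- c common, hence (nodup pvE filters disjoint) not in G
      have hcp : pvPb words c = true := (List.mem_filter.1 hx).2
      have hnG : c ∉ G := by
        intro hin
        have := (List.mem_filter.1 hin).2
        simp [hcp] at this
      simp [List.contains_eq_mem, hnG]
    · simp [List.contains_eq_mem, hx]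
  · intro h c hcs
    rw [PySem.Set.mem_ofList, List.mem_append]
    have hcw : c ∈ w.toList := by
      have := hcs
      rwa [pvWS, PySem.Set.mem_ofList] at this
    by_cases hcp : pvPb words c = true
    · exact Or.inl (List.mem_filter.2 ⟨hmemE c hcw, hcp⟩)
    · right
      have hcg : c ∈ G := List.mem_filter.2 ⟨hmemE c hcw, by simp [Bool.eq_false_iff.2 hcp]⟩
      have := h c hcs
      rw [Bool.or_eq_true] at this
      rcases this with hx | hx
      · exfalso
        rw [Bool.not_eq_true', List.contains_eq_mem, decide_eq_false_iff_not] at hx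
        exact hx hcg
      · rwa [List.contains_eq_mem, decide_eq_true_eq] at hx

theorem solution_eq (words : List String) (k : Int) : solution words k = solution_alt words k := by
  simp only [solution, solution_alt]
  rw [pvA_fold_fst, pvA_fold_snd, ← PySem.Dict.counter_eq_foldl, pvCommon_eq, pvGeneral_eq,
    pvSeen_eq, pvPartition_eq, List.nil_append]
  have hpred : (pvE words).filter
      (fun c => (words.map (fun w => PySem.Set.ofList w.toList)).all (fun s => PySem.Set.contains s c)) =
      (pvE words).filter (pvPb words) := by
    apply List.filter_congr
    intro c _
    exact pvAllContains_eq words c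
  have hpred2 : (pvE words).filter
      (fun c => !((words.map (fun w => PySem.Set.ofList w.toList)).all (fun s => PySem.Set.contains s c))) =
      (pvE words).filter (fun c => !pvPb words c) := by
    apply List.filter_congr
    intro c _
    rw [pvAllContains_eq words c]
  simp only [List.nil_append, hpred, hpred2, List.length_map]
  set C := (pvE words).filter (pvPb words) with hC
  set G := (pvE words).filter (fun c => !pvPb words c) with hG
  split_ifs with hneg hbig
  · rfl
  · rfl
  · -- main branch: A's combination fold = B's DFS
    have hndG : G.Nodup := (PySem.Set.nodup_ofList _).filter _
    rw [pvGo_eq G (k - (C.length : Int)) (words.map (fun w => PySem.Set.ofList w.toList))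
      (by omega) (by omega) hndG]
    apply PySem.List.foldl_congr_mem
    intro acc sel hsel
    have hsub := pvMem_pyCombinations G _ sel hsel
    have hmap : words.map (fun w => PySem.Set.ofList w.toList) = words.map pvWS := rfl
    rw [hmap, List.filter_map, List.filter_map]
    have hfc : words.filter ((fun wc => (PySem.Set.ofList (C ++ sel)).issuperset wc) ∘ pvWS) =
        words.filter (pvP G sel ∘ pvWS) := by
      apply List.filter_congr
      intro w hw
      simp only [Function.comp_apply]
      exact pvSup_eq_pvP words w hw sel hsub
    rw [hfc]

-- ===== VERDICT (by name: the statement is the Claim_ definition above) =====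
theorem solution_spec : Claim_equal_solution := by
  intro words k _
  unfold Spec_solution
  exact solution_eq words k
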